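-- pv_equiv track=rewrite | github.com/acelan/AceBIS | gen_script.py | gen_header
-- ===== SOURCE A (Python) =====
-- def gen_header(phase, build):
--     classes = ""
--     for i in build:
--         if i.isupper() == True:
--             classes = i
--         else:
--             classes += i
--     return "local bis_%s = AceBIS:RegisterBIS(\"%s\", \"%s\", \"%s\")\n" % (phase, classes, build, phase)
-- ===== SOURCE B (Python) =====
-- def gen_header(phase, build):
--     # Scan from the right, collecting chars until (and including) the first
--     # uppercase char seen; that suffix is exactly A's accumulated "classes".
--     suffix = []
--     for c in reversed(build):
--         suffix.append(c)
--         if c.isupper():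
--             break
--     classes = ''.join(reversed(suffix))
--     return "local bis_%s = AceBIS:RegisterBIS(\"%s\", \"%s\", \"%s\")\n" % (phase, classes, build, phase)
-- ===== Notes on version B (the rewrite author's own statement) =====
-- stated objective: simpler
-- what changed: Replaced A's left-to-right accumulator loop (reset at every uppercase char, with repeated string concatenation) by a right-to-left scan that stops at the first uppercase char, yielding the same suffix in one short pass.
import Mathlib
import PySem

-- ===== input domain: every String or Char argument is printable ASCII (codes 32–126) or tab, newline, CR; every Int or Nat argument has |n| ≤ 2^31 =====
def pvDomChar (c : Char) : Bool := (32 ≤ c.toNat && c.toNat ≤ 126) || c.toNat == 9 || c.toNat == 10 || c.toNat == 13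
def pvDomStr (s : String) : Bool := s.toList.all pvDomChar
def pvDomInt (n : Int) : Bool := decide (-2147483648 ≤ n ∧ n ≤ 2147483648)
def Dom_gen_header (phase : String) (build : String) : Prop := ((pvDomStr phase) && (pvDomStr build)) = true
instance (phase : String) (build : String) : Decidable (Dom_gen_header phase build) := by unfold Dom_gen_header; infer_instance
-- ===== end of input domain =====

-- B replaces A's left-to-right accumulator loop by a right-to-left scan stopping at the
-- first uppercase char; objective: simpler.

-- ===== PORT A =====
-- A's loop: classes = "" ; for i in build: if i.isupper(): classes = i else: classes += i
def genHeaderLoop (classes : List Char) : List Char → List Char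
  | [] => classes
  | c :: cs => genHeaderLoop (if PySem.Chars.isupper c then [c] else classes ++ [c]) cs

def gen_header (phase : String) (build : String) : String :=
  let classes := String.mk (genHeaderLoop [] build.toList)
  "local bis_" ++ phase ++ " = AceBIS:RegisterBIS(\"" ++ classes ++ "\", \"" ++ build ++ "\", \"" ++ phase ++ "\")\n"

-- ===== PORT B =====
-- Source B's loop over reversed(build): append each char, break after an uppercase one
def takeToUpper : List Char → List Char
  | [] => []
  | c :: cs => if PySem.Chars.isupper c then [c] else c :: takeToUpper cs

def gen_header_alt (phase : String) (build : String) : String :=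
  let classes := String.mk (takeToUpper build.toList.reverse).reverse
  String.join ["local bis_", phase, " = AceBIS:RegisterBIS(\"", classes,
    "\", \"", build, "\", \"", phase, "\")\n"]

-- ===== PRECONDITION & SPEC =====
def Spec_gen_header (phase : String) (build : String) (out : String) : Prop := out = gen_header_alt phase build
instance (phase : String) (build : String) (out : String) : Decidable (Spec_gen_header phase build out) := by unfold Spec_gen_header; infer_instance

-- ===== CLAIM =====
def Claim_equal_gen_header : Prop := ∀ (phase : String) (build : String), Dom_gen_header phase build → Spec_gen_header phase build (gen_header phase build)

-- ===== LEMMAS AND PROOFS =====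

theorem loop_concat (c : Char) : ∀ (cs : List Char) (acc : List Char),
    genHeaderLoop acc (cs ++ [c]) =
      if PySem.Chars.isupper c then [c] else genHeaderLoop acc cs ++ [c] := by
  intro cs
  induction cs with
  | nil => intro acc; simp [genHeaderLoop]
  | cons d ds ih => intro acc; simp only [List.cons_append, genHeaderLoop]; exact ih _

theorem loop_eq_takeToUpper (cs : List Char) :
    genHeaderLoop [] cs = (takeToUpper cs.reverse).reverse := by
  induction cs using List.reverseRecOn with
  | nil => simp [genHeaderLoop, takeToUpper]
  | append_singleton ds d ih =>
    rw [loop_concat]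
    simp only [List.reverse_append, List.reverse_cons, List.reverse_nil, List.nil_append,
      List.cons_append, takeToUpper]
    split
    · simp
    · simp [ih]

theorem join_eq (a b c d e f g h i : String) :
    String.join [a, b, c, d, e, f, g, h, i] = a ++ b ++ c ++ d ++ e ++ f ++ g ++ h ++ i := by
  simp [String.join]

-- ===== VERDICT =====
theorem gen_header_spec : Claim_equal_gen_header := by
  intro phase build _
  unfold Spec_gen_header gen_header gen_header_alt
  rw [join_eq, loop_eq_takeToUpper]
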